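-- pv_equiv track=rewrite | github.com/ChiranthanS/EAI | RoutePichu/arrange_pichus.py | View_Right
-- ===== SOURCE A (Python) =====
-- def View_Right(house_map,r,c):
--     while ((0<=r<len(house_map)) and (0<= c <len(house_map[0]))):
--         if house_map[r][c] in "X@":
--             return True
--         elif house_map[r][c]=="p":
--             return False
--         else:
--             c=c+1
--     return True
-- ===== SOURCE B (Python) =====
-- def View_Right(house_map, r, c):
--     if not (0 <= r < len(house_map)):
--         return True
--     width = len(house_map[0])
--     if not (0 <= c < width):
--         return True
--     row = house_map[r]
--
--     def pos(ch):
--         i = row.find(ch, c)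
--         return i if 0 <= i < width else width
--
--     mo = min(pos('X'), pos('@'))
--     pp = pos('p')
--     return mo <= pp
-- ===== Notes on version B (the rewrite author's own statement) =====
-- stated objective: alternative
-- what changed: Replaces A's cell-by-cell while loop over columns by three str.find searches (first 'X', '@', 'p' at or after c, positions past len(house_map[0]) discarded) and a single comparison of the first obstacle position with the first pichu position.
import Mathlib
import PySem

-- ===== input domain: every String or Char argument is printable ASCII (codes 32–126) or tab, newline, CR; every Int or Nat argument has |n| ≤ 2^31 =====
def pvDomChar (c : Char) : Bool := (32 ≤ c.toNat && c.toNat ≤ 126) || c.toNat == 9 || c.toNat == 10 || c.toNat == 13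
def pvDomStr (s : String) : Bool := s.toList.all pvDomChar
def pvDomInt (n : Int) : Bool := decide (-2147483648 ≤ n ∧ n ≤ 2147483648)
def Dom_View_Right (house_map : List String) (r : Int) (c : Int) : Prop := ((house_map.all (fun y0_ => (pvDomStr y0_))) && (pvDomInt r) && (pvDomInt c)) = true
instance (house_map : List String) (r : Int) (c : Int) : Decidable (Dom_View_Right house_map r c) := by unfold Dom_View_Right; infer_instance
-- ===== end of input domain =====

-- B replaces A's cell-by-cell while loop by three str.find searches (first 'X', '@', 'p' from c,
-- positions at or past len(house_map[0]) discarded) and compares the first obstacle with the first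
-- pichu position; objective: alternative decomposition, same cost class.

-- ===== PORT A =====
-- the while loop; fuel bounds its ≤ (width - c) iterations, when fuel hits 0 the loop
-- condition is already false (proved in the lemmas below), so the `true` matches Python
def View_Right_loop (house_map : List String) (r : Int) (c : Int) : Nat → Bool
  | 0 => true
  | fuel+1 =>
    if (0 ≤ r ∧ r < (house_map.length : Int)) ∧
       (0 ≤ c ∧ c < ((PySem.Str.len ((PySem.List.pyGet? house_map 0).getD "") : Int))) then
      match (PySem.List.pyGet? house_map r).bind (fun row => PySem.Str.pyGet? row c) with
      | none => true   -- Python raises IndexError here; excluded by Pre_View_Right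
      | some ch =>
        if ch = 'X' ∨ ch = '@' then true
        else if ch = 'p' then false
        else View_Right_loop house_map r (c+1) fuel
    else true

def View_Right (house_map : List String) (r : Int) (c : Int) : Bool :=
  View_Right_loop house_map r c
    (((PySem.Str.len ((PySem.List.pyGet? house_map 0).getD "") : Int) - c).toNat + 1)

-- ===== PORT B =====
-- Source B's pos(ch): first occurrence of ch at index ≥ c, `width` when absent or past width
def posFrom (row : String) (c : Int) (width : Int) (ch : String) : Int :=
  let i := PySem.Str.findFrom row ch c none
  if 0 ≤ i ∧ i < width then i else width

def View_Right_alt (house_map : List String) (r : Int) (c : Int) : Bool :=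
  if ¬ (0 ≤ r ∧ r < (house_map.length : Int)) then true
  else
    let width : Int := (PySem.Str.len ((PySem.List.pyGet? house_map 0).getD "") : Int)
    if ¬ (0 ≤ c ∧ c < width) then true
    else
      let row := (PySem.List.pyGet? house_map r).getD ""
      let mo := min (posFrom row c width "X") (posFrom row c width "@")
      let pp := posFrom row c width "p"
      decide (mo ≤ pp)

-- ===== PRECONDITION & SPEC =====
-- Pre_ excludes exactly the ragged inputs on which A raises IndexError: row r is shorter than
-- row 0 and the scan from c meets no 'X', '@' or 'p' before running off the end of row r.
def Pre_View_Right (house_map : List String) (r : Int) (c : Int) : Prop :=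
  (0 ≤ r ∧ r < (house_map.length : Int) ∧ 0 ≤ c ∧
     c < (PySem.Str.len ((PySem.List.pyGet? house_map 0).getD "") : Int)) →
  (PySem.Str.len ((PySem.List.pyGet? house_map 0).getD "") ≤
     ((PySem.List.pyGet? house_map r).getD "").toList.length ∨
   ∃ j, j < ((PySem.List.pyGet? house_map r).getD "").toList.length ∧ c.toNat ≤ j ∧
     (((PySem.List.pyGet? house_map r).getD "").toList[j]? = some 'X' ∨
      ((PySem.List.pyGet? house_map r).getD "").toList[j]? = some '@' ∨
      ((PySem.List.pyGet? house_map r).getD "").toList[j]? = some 'p'))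

instance (house_map : List String) (r : Int) (c : Int) : Decidable (Pre_View_Right house_map r c) := by
  unfold Pre_View_Right; infer_instance

def pvWitness_View_Right : List String × Int × Int := (["p.X"], 0, 0)

def Spec_View_Right (house_map : List String) (r : Int) (c : Int) (out : Bool) : Prop := out = View_Right_alt house_map r c
instance (house_map : List String) (r : Int) (c : Int) (out : Bool) : Decidable (Spec_View_Right house_map r c out) := by unfold Spec_View_Right; infer_instance

-- ===== CLAIM (what is proved, stated in full; the proofs are below) =====
def Claim_equal_View_Right : Prop := ∀ (house_map : List String) (r : Int) (c : Int), Dom_View_Right house_map r c → Pre_View_Right house_map r c → Spec_View_Right house_map r c (View_Right house_map r c)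


-- ===== LEMMAS AND PROOFS =====

-- proof-side twin of posFrom on List Char
def posC (s : List Char) (c : Int) (width : Int) (ch : Char) : Int :=
  if 0 ≤ PySem.Chars.findFrom s [ch] c none ∧ PySem.Chars.findFrom s [ch] c none < width
  then PySem.Chars.findFrom s [ch] c none else width

lemma prefix_single_iff (ch : Char) (t : List Char) : [ch] <+: t ↔ t[0]? = some ch := by
  cases t with
  | nil => simp
  | cons a u => simp [List.cons_prefix_cons, eq_comm]

lemma prefix_drop_iff (s : List Char) (ch : Char) (j : Nat) :
    [ch] <+: s.drop j ↔ s[j]? = some ch := by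
  rw [prefix_single_iff, List.getElem?_drop]
  simp

lemma infix_drop_iff (s : List Char) (ch : Char) (k : Nat) :
    [ch] <:+: s.drop k ↔ ∃ j, k ≤ j ∧ s[j]? = some ch := by
  rw [← PySem.Chars.isIn_iff_infix, ← PySem.Chars.exists_prefix_drop_iff_isIn]
  constructor
  · rintro ⟨j, hj⟩
    rw [List.drop_drop, prefix_drop_iff] at hj
    exact ⟨k + j, by omega, hj⟩
  · rintro ⟨j, hkj, hj⟩
    refine ⟨j - k, ?_⟩
    rw [List.drop_drop, prefix_drop_iff]
    have : k + (j - k) = j := by omega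
    rw [this]; exact hj

lemma ffChar_eq (s : List Char) (ch : Char) (k m : Nat) (hk : k ≤ s.length) (hkm : k ≤ m)
    (hm : s[m]? = some ch) (hmin : ∀ i, k ≤ i → i < m → s[i]? ≠ some ch) :
    PySem.Chars.findFrom s [ch] (k : Int) none = (m : Int) := by
  have hinf : [ch] <:+: s.drop k := (infix_drop_iff s ch k).2 ⟨m, hkm, hm⟩
  have hne : PySem.Chars.findFrom s [ch] (k : Int) none ≠ -1 := by
    rw [Ne, PySem.Chars.findFrom_natCast_eq_neg_one_iff s [ch] k hk]
    exact not_not_intro hinf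
  obtain ⟨h1, h2, h3⟩ := PySem.Chars.findFrom_natCast_spec s [ch] k hk hne
  set f := PySem.Chars.findFrom s [ch] (k : Int) none with hf
  have hocc : s[f.toNat]? = some ch := (prefix_drop_iff s ch f.toNat).1 h2
  have hk0 : (0 : Int) ≤ f := le_trans (by exact_mod_cast Nat.zero_le k) h1
  have hkf : k ≤ f.toNat := by omega
  rcases lt_trichotomy f.toNat m with hlt | heq | hgt
  · exact absurd hocc (hmin f.toNat hkf hlt)
  · omega
  · exact absurd ((prefix_drop_iff s ch m).2 hm) (h3 m hkm hgt)

lemma ffChar_none (s : List Char) (ch : Char) (k : Nat) (hk : k ≤ s.length)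
    (h : ∀ i, k ≤ i → s[i]? ≠ some ch) :
    PySem.Chars.findFrom s [ch] (k : Int) none = -1 := by
  rw [PySem.Chars.findFrom_natCast_eq_neg_one_iff s [ch] k hk]
  intro hinf
  obtain ⟨j, hkj, hj⟩ := (infix_drop_iff s ch k).1 hinf
  exact h j hkj hj

lemma pos_hit (s : List Char) (ch : Char) (k : Nat) (w : Int) (hkL : k < s.length)
    (hkw : (k : Int) < w) (h : s[k]? = some ch) : posC s k w ch = k := by
  have hf : PySem.Chars.findFrom s [ch] (k : Int) none = (k : Int) :=
    ffChar_eq s ch k k (le_of_lt hkL) le_rfl h (fun i h1 h2 => by omega)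
  simp [posC, hf, hkw]

lemma pos_miss (s : List Char) (ch : Char) (k : Nat) (w : Int) (hkL : k < s.length)
    (h : s[k]? ≠ some ch) : posC s k w ch = posC s (k+1 : Nat) w ch := by
  by_cases hex : ∃ m, k + 1 ≤ m ∧ s[m]? = some ch
  · classical
    set m := Nat.find hex with hmdef
    obtain ⟨hm1, hm2⟩ := Nat.find_spec hex
    have hmin1 : ∀ i, k + 1 ≤ i → i < m → s[i]? ≠ some ch := by
      intro i hi1 hi2 hocc
      exact (Nat.find_min hex hi2) ⟨hi1, hocc⟩
    have hminK : ∀ i, k ≤ i → i < m → s[i]? ≠ some ch := by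
      intro i hi1 hi2
      rcases Nat.eq_or_lt_of_le hi1 with rfl | hlt
      · exact h
      · exact hmin1 i hlt hi2
    have e1 : PySem.Chars.findFrom s [ch] (k : Int) none = (m : Int) :=
      ffChar_eq s ch k m (le_of_lt hkL) (by omega) hm2 hminK
    have e2 : PySem.Chars.findFrom s [ch] ((k+1 : Nat) : Int) none = (m : Int) :=
      ffChar_eq s ch (k+1) m hkL hm1 hm2 hmin1
    push_cast at e2
    simp [posC, e1, e2]
  · have hex : ∀ m, k + 1 ≤ m → s[m]? ≠ some ch := fun m hm hocc => hex ⟨m, hm, hocc⟩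
    have e1 : PySem.Chars.findFrom s [ch] (k : Int) none = -1 := by
      refine ffChar_none s ch k (le_of_lt hkL) ?_
      intro i hi
      rcases Nat.eq_or_lt_of_le hi with rfl | hlt
      · exact h
      · exact hex i hlt
    have e2 : PySem.Chars.findFrom s [ch] ((k+1 : Nat) : Int) none = -1 :=
      ffChar_none s ch (k+1) hkL (fun i hi => hex i hi)
    push_cast at e2
    simp [posC, e1, e2]

lemma pos_ge (s : List Char) (ch : Char) (k : Nat) (w : Int) (hk : k ≤ s.length)
    (hkw : (k : Int) ≤ w) : (k : Int) ≤ posC s k w ch := by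
  by_cases hne : PySem.Chars.findFrom s [ch] (k : Int) none = -1
  · simp [posC, hne, hkw]
  · obtain ⟨h1, _, _⟩ := PySem.Chars.findFrom_natCast_spec s [ch] k hk hne
    simp only [posC]
    split_ifs with hc
    · exact h1
    · exact hkw

lemma pos_top (s : List Char) (ch : Char) (k : Nat) (w : Int) (hk : k ≤ s.length)
    (h : w ≤ (k : Int)) : posC s k w ch = w := by
  by_cases hne : PySem.Chars.findFrom s [ch] (k : Int) none = -1
  · simp [posC, hne]
  · obtain ⟨h1, _, _⟩ := PySem.Chars.findFrom_natCast_spec s [ch] k hk hne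
    simp only [posC]
    split_ifs with hc
    · omega
    · rfl

lemma loop_eq (house_map : List String) (r : Int) (row : String)
    (hr : 0 ≤ r ∧ r < (house_map.length : Int))
    (hrow : PySem.List.pyGet? house_map r = some row) :
    ∀ (fuel k : Nat), k ≤ row.toList.length →
    PySem.Str.len ((PySem.List.pyGet? house_map 0).getD "") ≤ fuel + k →
    (PySem.Str.len ((PySem.List.pyGet? house_map 0).getD "") ≤ row.toList.length ∨
      ∃ j, j < row.toList.length ∧ k ≤ j ∧
        (row.toList[j]? = some 'X' ∨ row.toList[j]? = some '@' ∨ row.toList[j]? = some 'p')) →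
    View_Right_loop house_map r (k : Int) fuel =
      decide (min (posC row.toList k (PySem.Str.len ((PySem.List.pyGet? house_map 0).getD "") : Int) 'X')
                  (posC row.toList k (PySem.Str.len ((PySem.List.pyGet? house_map 0).getD "") : Int) '@')
              ≤ posC row.toList k (PySem.Str.len ((PySem.List.pyGet? house_map 0).getD "") : Int) 'p') := by
  intro fuel
  set W := PySem.Str.len ((PySem.List.pyGet? house_map 0).getD "") with hWdef
  induction fuel with
  | zero =>
    intro k hkL hfuel hinv
    have hWk : W ≤ (k : Int) := by simpa using hfuel
    simp only [View_Right_loop]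
    rw [pos_top _ _ _ _ hkL hWk, pos_top _ _ _ _ hkL hWk,
        pos_top _ _ _ _ hkL hWk]
    simp
  | succ fuel ih =>
    intro k hkL hfuel hinv
    simp only [View_Right_loop]
    by_cases hkw : (k : Int) < W
    · have hkL' : k < row.toList.length := by
        rcases hinv with hle | ⟨j, hj1, hj2, _⟩
        · have : (k : Int) < (row.toList.length : Int) := lt_of_lt_of_le hkw hle
          exact_mod_cast this
        · omega
      have hcond : (0 ≤ r ∧ r < (house_map.length : Int)) ∧
          (0 ≤ (k : Int) ∧ (k : Int) < W) := ⟨hr, by exact_mod_cast Nat.zero_le k, hkw⟩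
      rw [if_pos hcond, hrow]
      obtain ⟨a, ha⟩ : ∃ a, row.toList[k]? = some a := ⟨_, List.getElem?_eq_getElem hkL'⟩
      have hget : (some row).bind (fun row => PySem.Str.pyGet? row (k : Int)) = some a := by
        simp [ha]
      rw [hget]
      show (if a = 'X' ∨ a = '@' then true
            else if a = 'p' then false
            else View_Right_loop house_map r ((k : Int) + 1) fuel) = _
      have hk1L : k + 1 ≤ row.toList.length := hkL'
      have hk1W : ((k + 1 : Nat) : Int) ≤ W := by push_cast; omega
      by_cases haX : a = 'X' ∨ a = '@'
      · rw [if_pos haX]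
        have hpp : (k : Int) ≤ posC row.toList k W 'p' :=
          pos_ge _ _ _ _ (le_of_lt hkL') (le_of_lt hkw)
        rcases haX with rfl | rfl
        · have hx : posC row.toList k W 'X' = k := pos_hit _ _ _ _ hkL' hkw ha
          have : min (posC row.toList k W 'X') (posC row.toList k W '@')
              ≤ posC row.toList k W 'p' := le_trans (min_le_left _ _) (by rw [hx]; exact hpp)
          simp [this]
        · have hx : posC row.toList k W '@' = k := pos_hit _ _ _ _ hkL' hkw ha
          have : min (posC row.toList k W 'X') (posC row.toList k W '@')
              ≤ posC row.toList k W 'p' := le_trans (min_le_right _ _) (by rw [hx]; exact hpp)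
          simp [this]
      · rw [if_neg haX]
        obtain ⟨haX1, haX2⟩ := not_or.mp haX
        have hX : posC row.toList k W 'X' = posC row.toList (k+1 : Nat) W 'X' :=
          pos_miss _ _ _ _ hkL' (by rw [ha]; simp [haX1])
        have hA : posC row.toList k W '@' = posC row.toList (k+1 : Nat) W '@' :=
          pos_miss _ _ _ _ hkL' (by rw [ha]; simp [haX2])
        by_cases hap : a = 'p'
        · rw [if_pos hap]
          have hp : posC row.toList k W 'p' = k :=
            pos_hit _ _ _ _ hkL' hkw (hap ▸ ha)
          have gX : ((k+1 : Nat) : Int) ≤ posC row.toList (k+1 : Nat) W 'X' :=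
            pos_ge _ _ _ _ hk1L hk1W
          have gA : ((k+1 : Nat) : Int) ≤ posC row.toList (k+1 : Nat) W '@' :=
            pos_ge _ _ _ _ hk1L hk1W
          have hmin : ((k+1 : Nat) : Int) ≤
              min (posC row.toList k W 'X') (posC row.toList k W '@') := by
            rw [hX, hA]; exact le_min gX gA
          have hfalse : ¬ (min (posC row.toList k W 'X') (posC row.toList k W '@')
              ≤ posC row.toList k W 'p') := by
            rw [hp]
            push_cast at hmin
            omega
          simp [hfalse]
        · rw [if_neg hap]
          have hP : posC row.toList k W 'p' = posC row.toList (k+1 : Nat) W 'p' :=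
            pos_miss _ _ _ _ hkL' (by rw [ha]; simp [hap])
          have hcast : (k : Int) + 1 = ((k + 1 : Nat) : Int) := by push_cast; ring
          have hinv' : W ≤ (row.toList.length : Int) ∨
              ∃ j, j < row.toList.length ∧ k + 1 ≤ j ∧
                (row.toList[j]? = some 'X' ∨ row.toList[j]? = some '@' ∨
                 row.toList[j]? = some 'p') := by
            rcases hinv with hle | ⟨j, hj1, hj2, hj3⟩
            · exact Or.inl hle
            · refine Or.inr ⟨j, hj1, ?_, hj3⟩
              rcases Nat.eq_or_lt_of_le hj2 with rfl | hlt
              · exfalso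
                rcases hj3 with h3 | h3 | h3
                · rw [ha] at h3; exact haX1 (Option.some_injective _ h3)
                · rw [ha] at h3; exact haX2 (Option.some_injective _ h3)
                · rw [ha] at h3; exact hap (Option.some_injective _ h3)
              · omega
          rw [hcast, ih (k+1) hk1L (by push_cast at hfuel ⊢; omega) hinv', hX, hA, hP]
    · have hcond : ¬ ((0 ≤ r ∧ r < (house_map.length : Int)) ∧
          (0 ≤ (k : Int) ∧ (k : Int) < W)) := fun hcc => hkw hcc.2.2
      rw [if_neg hcond]
      have hWk : W ≤ (k : Int) := not_lt.mp hkw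
      rw [pos_top _ _ _ _ hkL hWk, pos_top _ _ _ _ hkL hWk,
          pos_top _ _ _ _ hkL hWk]
      simp

lemma posFromX (row : String) (c w : Int) : posFrom row c w "X" = posC row.toList c w 'X' := by
  simp [posFrom, posC]

lemma posFromA (row : String) (c w : Int) : posFrom row c w "@" = posC row.toList c w '@' := by
  simp [posFrom, posC]

lemma posFromP (row : String) (c w : Int) : posFrom row c w "p" = posC row.toList c w 'p' := by
  simp [posFrom, posC]

lemma alt_guard_r (house_map : List String) (r c : Int)
    (hr : ¬ (0 ≤ r ∧ r < (house_map.length : Int))) :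
    View_Right_alt house_map r c = true := by
  unfold View_Right_alt
  rw [if_pos hr]

lemma alt_guard_c (house_map : List String) (r c : Int)
    (hc : ¬ (0 ≤ c ∧ c < PySem.Str.len ((PySem.List.pyGet? house_map 0).getD ""))) :
    View_Right_alt house_map r c = true := by
  simp only [View_Right_alt]
  by_cases h1 : 0 ≤ r ∧ r < (house_map.length : Int)
  · rw [if_neg (not_not_intro h1), if_pos hc]
  · rw [if_pos h1]

lemma alt_main (house_map : List String) (r c : Int) (row : String)
    (hr : 0 ≤ r ∧ r < (house_map.length : Int))
    (hc : 0 ≤ c ∧ c < PySem.Str.len ((PySem.List.pyGet? house_map 0).getD ""))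
    (hrow : PySem.List.pyGet? house_map r = some row) :
    View_Right_alt house_map r c =
      decide (min (posC row.toList c (PySem.Str.len ((PySem.List.pyGet? house_map 0).getD "")) 'X')
                  (posC row.toList c (PySem.Str.len ((PySem.List.pyGet? house_map 0).getD "")) '@')
              ≤ posC row.toList c (PySem.Str.len ((PySem.List.pyGet? house_map 0).getD "")) 'p') := by
  simp only [View_Right_alt, hrow, Option.getD_some]
  rw [if_neg (not_not_intro hr), if_neg (not_not_intro hc)]
  simp only [posFromX, posFromA, posFromP]

-- ===== VERDICT (by name: the statement is the Claim_ definition above) =====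
theorem View_Right_spec : Claim_equal_View_Right := by
  intro house_map r c _ hpre
  unfold Spec_View_Right
  by_cases hr : 0 ≤ r ∧ r < (house_map.length : Int)
  · by_cases hc : 0 ≤ c ∧ c < PySem.Str.len ((PySem.List.pyGet? house_map 0).getD "")
    · have hrt : r = ((r.toNat : Nat) : Int) := by omega
      have hlt : r.toNat < house_map.length := by
        have := hr.2; omega
      obtain ⟨row, hrowg⟩ : ∃ row, house_map[r.toNat]? = some row :=
        ⟨_, List.getElem?_eq_getElem hlt⟩
      have hrow : PySem.List.pyGet? house_map r = some row := by
        rw [hrt, PySem.List.pyGet?_natCast]; exact hrowg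
      have hinv0 := hpre ⟨hr.1, hr.2, hc.1, hc.2⟩
      rw [hrow] at hinv0
      simp only [Option.getD_some] at hinv0
      have hck : c = ((c.toNat : Nat) : Int) := by omega
      have hkW : (c.toNat : Int) < PySem.Str.len ((PySem.List.pyGet? house_map 0).getD "") := by
        rw [← hck]; exact hc.2
      have hinv : PySem.Str.len ((PySem.List.pyGet? house_map 0).getD "") ≤ (row.toList.length : Int) ∨
          ∃ j, j < row.toList.length ∧ c.toNat ≤ j ∧
            (row.toList[j]? = some 'X' ∨ row.toList[j]? = some '@' ∨
             row.toList[j]? = some 'p') := by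
        rcases hinv0 with h | h
        · exact Or.inl (by exact_mod_cast h)
        · exact Or.inr h
      have hkL : c.toNat ≤ row.toList.length := by
        rcases hinv with hle | ⟨j, hj1, hj2, _⟩
        · have : (c.toNat : Int) < (row.toList.length : Int) := lt_of_lt_of_le hkW hle
          exact_mod_cast le_of_lt this
        · omega
      unfold View_Right
      rw [hck]
      rw [loop_eq house_map r row hr hrow _ c.toNat hkL
          (by push_cast; omega) hinv]
      rw [alt_main house_map r (((c.toNat : Nat)) : Int) row hr
          ⟨by rw [← hck]; exact hc.1, hkW⟩ hrow]
    · unfold View_Right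
      simp only [View_Right_loop]
      rw [if_neg (fun hcc => hc hcc.2), alt_guard_c house_map r c hc]
  · unfold View_Right
    simp only [View_Right_loop]
    rw [if_neg (fun hcc => hr hcc.1), alt_guard_r house_map r c hr]
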